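-- pv_equiv track=rewrite | github.com/cola0405/leetcode | array/1424.py | findDiagonalOrder
-- ===== SOURCE A (Python) =====
-- from typing import List
--
-- def findDiagonalOrder(nums: List[List[int]]) -> List[int]:
--     from collections import defaultdict
--     d = defaultdict(list)
--     n = len(nums)
--     max_size = 0
--     for i in range(n)[::-1]:
--         max_size = max(max_size, len(nums[i]))
--         for j in range(len(nums[i])):
--             d[i+j].append(nums[i][j])       # store the elements in the diagonal
--
--     ans = []
--     for i in range(n-1+max_size):
--         for num in d[i]:
--             ans.append(num)
--     return ans
-- ===== SOURCE B (Python) =====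
-- def findDiagonalOrder(nums):
--     n = len(nums)
--     w = max(map(len, nums), default=0)
--     return [nums[i][k - i]
--             for k in range(n - 1 + w)
--             for i in range(min(k, n - 1), -1, -1)
--             if k - i < len(nums[i])]
-- ===== Notes on version B (the rewrite author's own statement) =====
-- stated objective: simpler
-- what changed: Replaces the defaultdict bucket-then-emit two-phase loop with a single comprehension that generates each diagonal k directly by walking i from min(k, n-1) down to 0 and emitting nums[i][k-i] when it exists, so no dict and no per-bucket bookkeeping are needed.
import Mathlib
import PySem

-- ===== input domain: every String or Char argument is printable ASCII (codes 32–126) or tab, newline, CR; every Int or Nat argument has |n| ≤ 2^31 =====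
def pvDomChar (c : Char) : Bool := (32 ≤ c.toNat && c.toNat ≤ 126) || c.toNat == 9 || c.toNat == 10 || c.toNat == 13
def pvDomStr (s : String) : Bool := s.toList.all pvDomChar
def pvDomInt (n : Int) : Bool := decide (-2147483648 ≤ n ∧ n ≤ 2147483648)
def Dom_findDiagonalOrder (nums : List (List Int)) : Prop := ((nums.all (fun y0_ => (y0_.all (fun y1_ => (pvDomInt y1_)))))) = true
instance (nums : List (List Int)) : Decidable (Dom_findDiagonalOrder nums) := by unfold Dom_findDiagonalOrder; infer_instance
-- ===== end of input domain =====

-- B replaces A's defaultdict-bucket-then-emit strategy by directly generating each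
-- diagonal from index arithmetic (one comprehension, no dict); objective: simpler.

-- ===== PORT A =====
-- 'for i in range(n)[::-1]' = the reversed range; 'd[i+j].append(v)' on a defaultdict(list)
-- is d.modify (i+j) [] (· ++ [v]); 'd[i]' in the emit loop reads d.getD i [] (the defaultdict
-- default-insertion of an empty list cannot affect ans).  nums[i] / nums[i][j] are always
-- in range here, so pyGetD's default is never taken.
def findDiagonalOrder (nums : List (List Int)) : List Int :=
  let n : Int := nums.length
  let st := (((PySem.List.slice? (PySem.List.pyRange 0 n 1) none none (-1)).getD [])).foldl
    (fun (st : PySem.Dict Int (List Int) × Int) i =>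
      let row := PySem.List.pyGetD nums i []
      let ms := max st.2 (row.length : Int)
      let d := (PySem.List.pyRange 0 (row.length : Int) 1).foldl
        (fun d j => d.modify (i + j) [] (· ++ [PySem.List.pyGetD row j 0])) st.1
      (d, ms))
    (PySem.Dict.empty, 0)
  (PySem.List.pyRange 0 (n - 1 + st.2) 1).foldl
    (fun ans i => (st.1.getD i []).foldl (fun a num => a ++ [num]) ans) []

-- ===== PORT B =====
-- 'max(map(len, nums), default=0)' = (max? … id).getD 0; the double comprehension with an
-- 'if' filter is the nested flatMap with 'if … then [·] else []'.
def findDiagonalOrder_alt (nums : List (List Int)) : List Int :=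
  let n : Int := nums.length
  let w : Int := (PySem.List.max? (nums.map (fun r => (r.length : Int))) (fun x => x)).getD 0
  (PySem.List.pyRange 0 (n - 1 + w) 1).flatMap (fun k =>
    (PySem.List.pyRange (min k (n - 1)) (-1) (-1)).flatMap (fun i =>
      let row := PySem.List.pyGetD nums i []
      if k - i < (row.length : Int) then [PySem.List.pyGetD row (k - i) 0] else []))

-- ===== PRECONDITION & SPEC =====
def Spec_findDiagonalOrder (nums : List (List Int)) (out : List Int) : Prop := out = findDiagonalOrder_alt nums
instance (nums : List (List Int)) (out : List Int) : Decidable (Spec_findDiagonalOrder nums out) := by unfold Spec_findDiagonalOrder; infer_instance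

-- ===== CLAIM (what is proved, stated in full; the proofs are below) =====
def Claim_equal_findDiagonalOrder : Prop := ∀ (nums : List (List Int)), Dom_findDiagonalOrder nums → Spec_findDiagonalOrder nums (findDiagonalOrder nums)

-- ===== LEMMAS AND PROOFS =====

theorem pv_flatMap_congr_mem {α β : Type} (l : List α) (f g : α → List β)
    (h : ∀ x ∈ l, f x = g x) : l.flatMap f = l.flatMap g := by
  induction l with
  | nil => rfl
  | cons a t ih =>
    simp only [List.flatMap_cons]
    rw [h a (by simp), ih (fun x hx => h x (by simp [hx]))]

theorem pv_filter_flatMap {α β : Type} (l : List α) (f : α → List β) (p : β → Bool) :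
    (l.flatMap f).filter p = l.flatMap (fun x => (f x).filter p) := by
  induction l with
  | nil => rfl
  | cons a t ih => simp [List.flatMap_cons, List.filter_append, ih]

theorem pv_map_flatMap {α β γ : Type} (l : List α) (f : α → List β) (g : β → γ) :
    (l.flatMap f).map g = l.flatMap (fun x => (f x).map g) := by
  induction l with
  | nil => rfl
  | cons a t ih => simp [List.flatMap_cons, ih]

-- filter by equality on a Nodup list keeps exactly the one occurrence
theorem pv_filter_beq_nodup (l : List Int) (a : Int) (hnd : l.Nodup) :
    l.filter (fun x => x == a) = if a ∈ l then [a] else [] := by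
  induction l with
  | nil => simp
  | cons x t ih =>
    rcases List.nodup_cons.mp hnd with ⟨hx, ht⟩
    by_cases hxa : x = a
    · subst hxa
      have : t.filter (fun y => y == x) = [] := by
        rw [ih ht]; simp [hx]
      simp [this]
    · simp [hxa, ih ht, List.mem_cons, Ne.symm hxa]

-- pulling a max through a foldl-max loop
theorem pv_foldl_max_init (g : Int → Int) (l : List Int) (a b : Int) :
    l.foldl (fun m i => max m (g i)) (max a b) =
      max (l.foldl (fun m i => max m (g i)) a) b := by
  induction l generalizing a with
  | nil => rfl
  | cons x t ih => simp only [List.foldl_cons, max_right_comm a b (g x), ih]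

theorem pv_foldl_max_reverse (g : Int → Int) (l : List Int) (a : Int) :
    l.reverse.foldl (fun m i => max m (g i)) a = l.foldl (fun m i => max m (g i)) a := by
  induction l generalizing a with
  | nil => rfl
  | cons x t ih =>
    simp only [List.reverse_cons, List.foldl_append, List.foldl_cons, List.foldl_nil]
    rw [ih, pv_foldl_max_init]

-- A's big fold splits into a dict fold over the flattened (key,value) pairs and a max fold
theorem pv_fold_split (nums : List (List Int)) (L : List Int)
    (d0 : PySem.Dict Int (List Int)) (m0 : Int) :
    L.foldl
      (fun (st : PySem.Dict Int (List Int) × Int) i =>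
        let row := PySem.List.pyGetD nums i []
        let ms := max st.2 (row.length : Int)
        let d := (PySem.List.pyRange 0 (row.length : Int) 1).foldl
          (fun d j => d.modify (i + j) [] (· ++ [PySem.List.pyGetD row j 0])) st.1
        (d, ms)) (d0, m0) =
    ((L.flatMap (fun i =>
        (PySem.List.pyRange 0 ((PySem.List.pyGetD nums i []).length : Int) 1).map
          (fun j => (i + j, PySem.List.pyGetD (PySem.List.pyGetD nums i []) j 0)))).foldl
        (fun d p => d.modify p.1 [] (· ++ [p.2])) d0,
     L.foldl (fun m i => max m ((PySem.List.pyGetD nums i []).length : Int)) m0) := by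
  induction L generalizing d0 m0 with
  | nil => rfl
  | cons i t ih =>
    simp only [List.foldl_cons, List.flatMap_cons, List.foldl_append, List.foldl_map]
    exact ih _ _

-- the per-diagonal lists of A and B coincide for k ≥ 0
theorem pv_diag_eq (nums : List (List Int)) (k : Int) (hk : 0 ≤ k) :
    ((((PySem.List.pyRange 0 (nums.length : Int) 1).reverse).flatMap (fun i =>
        (PySem.List.pyRange 0 ((PySem.List.pyGetD nums i []).length : Int) 1).map
          (fun j => (i + j, PySem.List.pyGetD (PySem.List.pyGetD nums i []) j 0)))).filter
        (fun p => p.1 == k)).map (·.2) =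
    (PySem.List.pyRange (min k ((nums.length : Int) - 1)) (-1) (-1)).flatMap (fun i =>
      let row := PySem.List.pyGetD nums i []
      if k - i < (row.length : Int) then [PySem.List.pyGetD row (k - i) 0] else []) := by
  rw [pv_filter_flatMap, pv_map_flatMap, PySem.List.pyRange_neg_one_eq_reverse]
  -- the per-row contribution, in closed form
  have hrow : ∀ i : Int,
      (((PySem.List.pyRange 0 ((PySem.List.pyGetD nums i []).length : Int) 1).map
          (fun j => (i + j, PySem.List.pyGetD (PySem.List.pyGetD nums i []) j 0))).filter
        (fun p => p.1 == k)).map (·.2) =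
      if 0 ≤ k - i ∧ k - i < ((PySem.List.pyGetD nums i []).length : Int)
        then [PySem.List.pyGetD (PySem.List.pyGetD nums i []) (k - i) 0] else [] := by
    intro i
    rw [List.filter_map]
    have hpred : ((fun p => p.1 == k) ∘
        (fun j => (i + j, PySem.List.pyGetD (PySem.List.pyGetD nums i []) j 0))) =
        (fun j : Int => j == k - i) := by
      funext j
      by_cases h : j = k - i
      · simp [h, show i + (k - i) = k from by omega]
      · have h2 : i + j ≠ k := by omega
        simp [Function.comp_apply, h, h2]
    rw [hpred, pv_filter_beq_nodup _ _ (PySem.List.nodup_pyRange_one 0 _)]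
    by_cases h : 0 ≤ k - i ∧ k - i < ((PySem.List.pyGetD nums i []).length : Int)
    · rw [if_pos (PySem.List.mem_pyRange_one.mpr ⟨h.1, h.2⟩), if_pos h]
      simp only [List.map_cons, List.map_nil]
    · rw [if_neg (fun hmem => h (PySem.List.mem_pyRange_one.mp hmem)), if_neg h]
      rfl
  simp only [hrow]
  by_cases hn : nums.length = 0
  · rw [hn]
    simp only [Int.natCast_zero]
    rw [PySem.List.pyRange_one_eq_nil (by omega), PySem.List.pyRange_one_eq_nil (by omega)]
    rfl
  · set n : Int := (nums.length : Int) with hdefn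
    have hn1 : 1 ≤ n := by omega
    set m : Int := min k (n - 1) + 1 with hdefm
    have hm0 : 0 ≤ m := by omega
    have hmn : m ≤ n := by omega
    rw [PySem.List.pyRange_one_append 0 m n hm0 hmn, List.reverse_append,
        List.flatMap_append]
    have hhigh : (PySem.List.pyRange m n 1).reverse.flatMap
        (fun i => if 0 ≤ k - i ∧ k - i < ((PySem.List.pyGetD nums i []).length : Int)
          then [PySem.List.pyGetD (PySem.List.pyGetD nums i []) (k - i) 0] else []) = [] := by
      rw [pv_flatMap_congr_mem _ _ (fun _ => ([] : List Int))
        (by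
          intro i hi
          rw [List.mem_reverse, PySem.List.mem_pyRange_one] at hi
          rw [if_neg (by omega)])]
      simp
    have hlow : ∀ i ∈ (PySem.List.pyRange 0 m 1).reverse,
        (if 0 ≤ k - i ∧ k - i < ((PySem.List.pyGetD nums i []).length : Int)
          then [PySem.List.pyGetD (PySem.List.pyGetD nums i []) (k - i) 0] else []) =
        (if k - i < ((PySem.List.pyGetD nums i []).length : Int)
          then [PySem.List.pyGetD (PySem.List.pyGetD nums i []) (k - i) 0] else []) := by
      intro i hi
      rw [List.mem_reverse, PySem.List.mem_pyRange_one] at hi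
      by_cases h2 : k - i < ((PySem.List.pyGetD nums i []).length : Int)
      · rw [if_pos ⟨by omega, h2⟩, if_pos h2]
      · rw [if_neg (by omega), if_neg h2]
    rw [hhigh, pv_flatMap_congr_mem _ _ _ hlow]
    rfl

-- A's running max over the reversed row indices is B's max of the row lengths
theorem pv_ms_eq_w (nums : List (List Int)) :
    (PySem.List.pyRange 0 (nums.length : Int) 1).reverse.foldl
      (fun m i => max m ((PySem.List.pyGetD nums i []).length : Int)) 0 =
    (PySem.List.max? (nums.map (fun r => (r.length : Int))) (fun x => x)).getD 0 := by
  rw [pv_foldl_max_reverse]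
  rw [PySem.List.foldl_pyRange_zero_pyGetD' nums [] (fun m r => max m ((r.length : Int))) 0]
  cases nums with
  | nil => rfl
  | cons r t =>
    rw [List.map_cons, PySem.List.max?_id_cons, Option.getD_some, List.foldl_map,
        List.foldl_cons, max_eq_right (Int.natCast_nonneg r.length)]

-- ===== VERDICT (by name: the statement is the Claim_ definition above) =====
theorem findDiagonalOrder_spec : Claim_equal_findDiagonalOrder := by
  intro nums _
  unfold Spec_findDiagonalOrder
  show findDiagonalOrder nums = findDiagonalOrder_alt nums
  simp only [findDiagonalOrder, findDiagonalOrder_alt]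
  rw [PySem.List.slice?_none_none_neg_one, Option.getD_some, pv_fold_split]
  simp only [PySem.List.foldl_append_singleton_eq_self]
  rw [pv_ms_eq_w, PySem.List.foldl_append_eq_flatMap, List.nil_append]
  simp only [PySem.Dict.getD_foldl_modify_append, PySem.Dict.getD_empty, List.nil_append]
  refine pv_flatMap_congr_mem _ _ _ (fun k hk => ?_)
  rw [PySem.List.mem_pyRange_one] at hk
  exact pv_diag_eq nums k hk.1
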